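-- pv_equiv track=rewrite | github.com/AlexandreCotorobai/FP | APA1/MiniTeste/Exercício3(dif de pos entre 1 e ultimo).py | positionDifferenceFirstLastLargest
-- ===== SOURCE A (Python) =====
-- def positionDifferenceFirstLastLargest(lst):
--     contador = -1
--     maior=lst[0]
--     l=[]
--     for numero in lst:
--         if maior < numero:
--             maior=numero
--     for elemento in lst:
--         contador += 1
--         if elemento==maior:
--             l += [contador]
--     return l[0]-l[-1]
-- ===== SOURCE B (Python) =====
-- def positionDifferenceFirstLastLargest(lst):
--     maior = lst[0]
--     first = last = 0
--     for i, v in enumerate(lst):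
--         if maior < v:
--             maior = v
--             first = last = i
--         elif v == maior:
--             last = i
--     return first - last
-- ===== Notes on version B (the rewrite author's own statement) =====
-- stated objective: alternative
-- what changed: Replaces A's two staged scans (a running-max loop, then a counter loop collecting every index of the max into a list that is finally subtracted end-to-end) by a single pass maintaining running state (maior, first, last): a strictly larger value resets first=last=i, an equal value extends last, so the second scan and the intermediate index list disappear.
import Mathlib
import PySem

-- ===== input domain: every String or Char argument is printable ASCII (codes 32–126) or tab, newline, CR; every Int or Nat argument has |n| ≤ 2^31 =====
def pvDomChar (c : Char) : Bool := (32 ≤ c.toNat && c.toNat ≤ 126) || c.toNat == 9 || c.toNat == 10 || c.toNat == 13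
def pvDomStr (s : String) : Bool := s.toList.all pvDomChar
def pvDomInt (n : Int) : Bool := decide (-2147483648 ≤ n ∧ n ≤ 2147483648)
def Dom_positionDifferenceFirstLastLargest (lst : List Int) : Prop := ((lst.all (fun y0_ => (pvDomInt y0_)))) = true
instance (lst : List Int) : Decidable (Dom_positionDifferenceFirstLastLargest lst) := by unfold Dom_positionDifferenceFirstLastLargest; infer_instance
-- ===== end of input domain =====

-- B replaces A's two staged scans (running max, then a counter loop collecting every index of the
-- max into a list) by ONE pass maintaining running state (maior, first, last); no index list is built.


-- ===== PORT A =====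
-- literal transliteration of A: maior = lst[0]; running-max loop; counter loop building the
-- list l of indices whose element equals maior; return l[0] - l[-1].
def positionDifferenceFirstLastLargest (lst : List Int) : Int :=
  match PySem.List.pyGet? lst 0 with       -- lst[0]; none = IndexError, excluded by Pre_
  | none => 0
  | some h =>
    let maior := lst.foldl (fun m n => if m < n then n else m) h
    let st := lst.foldl
      (fun (st : Int × List Int) e =>
        let c := st.1 + 1
        (c, if e = maior then st.2 ++ [c] else st.2))
      (-1, ([] : List Int))
    match PySem.List.pyGet? st.2 0, PySem.List.pyGet? st.2 (-1) with
    | some a, some b => a - b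
    | _, _ => 0                            -- unreachable: maior ∈ lst, so st.2 ≠ []

-- ===== PORT B =====
-- B's loop body: a strictly larger value resets (maior, first, last); an equal value extends last.
def pvStepB (st : Int × Int × Int) (p : Int × Int) : Int × Int × Int :=
  if st.1 < p.2 then (p.2, p.1, p.1)
  else if p.2 = st.1 then (st.1, st.2.1, p.1)
  else st

-- literal transliteration of B: maior = lst[0]; first = last = 0; one pass over enumerate(lst).
def positionDifferenceFirstLastLargest_alt (lst : List Int) : Int :=
  match PySem.List.pyGet? lst 0 with       -- lst[0]; none = IndexError, excluded by Pre_
  | none => 0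
  | some h =>
    let st := (PySem.List.enumerate lst 0).foldl pvStepB (h, 0, 0)
    st.2.1 - st.2.2

-- ===== PRECONDITION & SPEC =====
-- Both A and B raise IndexError on the empty list (lst[0]); Pre_ excludes exactly it.
def Pre_positionDifferenceFirstLastLargest (lst : List Int) : Prop := lst ≠ []
instance (lst : List Int) : Decidable (Pre_positionDifferenceFirstLastLargest lst) := by unfold Pre_positionDifferenceFirstLastLargest; infer_instance
def pvWitness_positionDifferenceFirstLastLargest : List Int := [3, 1, 3, 2]
def Spec_positionDifferenceFirstLastLargest (lst : List Int) (out : Int) : Prop := out = positionDifferenceFirstLastLargest_alt lst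
instance (lst : List Int) (out : Int) : Decidable (Spec_positionDifferenceFirstLastLargest lst out) := by unfold Spec_positionDifferenceFirstLastLargest; infer_instance

-- ===== CLAIM (what is proved, stated in full; the proofs are below) =====
def Claim_equal_positionDifferenceFirstLastLargest : Prop := ∀ (lst : List Int), Dom_positionDifferenceFirstLastLargest lst → Pre_positionDifferenceFirstLastLargest lst → Spec_positionDifferenceFirstLastLargest lst (positionDifferenceFirstLastLargest lst)

-- ===== LEMMAS AND PROOFS =====

-- ---- A-side characterisation: the index list A builds ----
-- the list of (Int) indices of occurrences of m, starting at position c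
def pvIdxs (m : Int) (lst : List Int) (c : Int) : List Int :=
  match lst with
  | [] => []
  | x :: xs => if x = m then c :: pvIdxs m xs (c + 1) else pvIdxs m xs (c + 1)

theorem pvIdxs_fold (m : Int) (lst : List Int) (c : Int) (acc : List Int) :
    (lst.foldl
      (fun (st : Int × List Int) e =>
        (st.1 + 1, if e = m then st.2 ++ [st.1 + 1] else st.2))
      (c, acc)).2 = acc ++ pvIdxs m lst (c + 1) := by
  induction lst generalizing c acc with
  | nil => simp [pvIdxs]
  | cons x xs ih =>
    simp only [List.foldl_cons, pvIdxs]
    by_cases hx : x = m <;> simp [hx, ih, List.append_assoc]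

theorem pvIdxs_of_not_mem (m : Int) (lst : List Int) (c : Int) (h : m ∉ lst) :
    pvIdxs m lst c = [] := by
  induction lst generalizing c with
  | nil => rfl
  | cons x xs ih =>
    simp only [List.mem_cons, not_or] at h
    simp [pvIdxs, Ne.symm h.1, ih _ h.2]

theorem pvIdxs_head? (m : Int) (lst : List Int) (c : Int) (h : m ∈ lst) :
    (pvIdxs m lst c).head? = some (c + (lst.idxOf m : Int)) := by
  induction lst generalizing c with
  | nil => simp at h
  | cons x xs ih =>
    by_cases hx : x = m
    · simp [pvIdxs, hx, List.idxOf_cons_self]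
    · have hm : m ∈ xs := by
        rcases List.mem_cons.mp h with h1 | h1
        · exact absurd h1.symm hx
        · exact h1
      simp only [pvIdxs, if_neg hx, ih _ hm, List.idxOf_cons_ne _ hx]
      congr 1
      push_cast
      ring

theorem pv_getLast?_cons_of_ne_nil (l : List Int) (c : Int) (h : l ≠ []) :
    (c :: l).getLast? = l.getLast? := by
  rw [List.getLast?_cons]
  cases hlast : l.getLast? with
  | none => exact absurd (List.getLast?_eq_none_iff.mp hlast) h
  | some b => simp

theorem pvIdxs_getLast? (m : Int) (lst : List Int) (c : Int) (h : m ∈ lst) :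
    (pvIdxs m lst c).getLast? =
      some (c + ((lst.length - 1 - lst.reverse.idxOf m : Nat) : Int)) := by
  induction lst generalizing c with
  | nil => simp at h
  | cons x xs ih =>
    by_cases hm : m ∈ xs
    · have hne : pvIdxs m xs (c + 1) ≠ [] := by
        intro he
        have := pvIdxs_head? m xs (c + 1) hm
        rw [he] at this; simp at this
      have hidx : (x :: xs).reverse.idxOf m = xs.reverse.idxOf m := by
        simp only [List.reverse_cons]
        exact List.idxOf_append_of_mem (by simpa using hm)
      have hle : xs.reverse.idxOf m < xs.length := by
        have := List.idxOf_lt_length_of_mem (l := xs.reverse) (by simpa using hm)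
        simpa using this
      have harith : (c + 1) + ((xs.length - 1 - xs.reverse.idxOf m : Nat) : Int)
          = c + (((x :: xs).length - 1 - (x :: xs).reverse.idxOf m : Nat) : Int) := by
        rw [hidx]
        simp only [List.length_cons]
        omega
      by_cases hx : x = m
      · simp only [pvIdxs, if_pos hx]
        rw [pv_getLast?_cons_of_ne_nil _ _ hne, ih _ hm, harith]
      · simp only [pvIdxs, if_neg hx]
        rw [ih _ hm, harith]
    · have hx : x = m := by
        rcases List.mem_cons.mp h with h1 | h1
        · exact h1.symm
        · exact absurd h1 hm
      have hrev : List.idxOf m (xs.reverse ++ [x]) = xs.reverse.length := by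
        rw [List.idxOf_append_of_notMem (by simpa using hm), hx]
        simp
      simp only [pvIdxs, if_pos hx, pvIdxs_of_not_mem m xs _ hm, List.reverse_cons, hrev]
      simp

-- A's running-max fold is List.foldl max
theorem pv_fold_max (lst : List Int) (a : Int) :
    lst.foldl (fun m n => if m < n then n else m) a = lst.foldl max a := by
  induction lst generalizing a with
  | nil => rfl
  | cons x xs ih =>
    simp only [List.foldl_cons, ih]
    congr 1
    rcases lt_trichotomy a x with h | h | h <;> simp [max_def] <;> omega

-- ---- foldl max facts ----
theorem pv_le_foldl_max (xs : List Int) (m : Int) : m ≤ xs.foldl max m := by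
  induction xs generalizing m with
  | nil => exact le_refl m
  | cons x xs ih => exact le_trans (le_max_left m x) (ih (max m x))

theorem pv_all_le_foldl_max (xs : List Int) (m : Int) :
    ∀ x ∈ xs, x ≤ xs.foldl max m := by
  induction xs generalizing m with
  | nil => intro x hx; simp at hx
  | cons a as ih =>
    intro x hx
    rcases List.mem_cons.mp hx with h | h
    · subst h
      exact le_trans (le_max_right m x) (pv_le_foldl_max as (max m x))
    · exact ih (max m a) x h

theorem pv_foldl_max_eq_of_le (xs : List Int) (m : Int) (h : ∀ x ∈ xs, x ≤ m) :
    xs.foldl max m = m := by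
  induction xs with
  | nil => rfl
  | cons a as ih =>
    have ha : a ≤ m := h a (List.mem_cons_self)
    simp only [List.foldl_cons, max_eq_left ha]
    exact ih (fun x hx => h x (List.mem_cons_of_mem a hx))

theorem pv_foldl_max_mem (xs : List Int) (m : Int) (h : m < xs.foldl max m) :
    xs.foldl max m ∈ xs := by
  induction xs generalizing m with
  | nil => simp at h
  | cons a as ih =>
    simp only [List.foldl_cons] at h ⊢
    by_cases hlt : max m a < as.foldl max (max m a)
    · exact List.mem_cons_of_mem a (ih (max m a) hlt)
    · have : as.foldl max (max m a) = max m a :=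
        le_antisymm (not_lt.mp hlt) (pv_le_foldl_max as (max m a))
      rw [this] at h ⊢
      have : max m a = a := by
        rcases max_choice m a with h1 | h1 <;> [omega; exact h1]
      rw [this]
      exact List.mem_cons_self

-- ---- last-index arithmetic helpers ----
theorem pv_last_cons_mem (x M : Int) (xs : List Int) (k : Int) (hm : M ∈ xs) :
    k + (((x :: xs).length - 1 - (x :: xs).reverse.idxOf M : Nat) : Int)
      = (k + 1) + ((xs.length - 1 - xs.reverse.idxOf M : Nat) : Int) := by
  have hidx : (x :: xs).reverse.idxOf M = xs.reverse.idxOf M := by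
    simp only [List.reverse_cons]
    exact List.idxOf_append_of_mem (by simpa using hm)
  have hle : xs.reverse.idxOf M < xs.length := by
    have := List.idxOf_lt_length_of_mem (l := xs.reverse) (by simpa using hm)
    simpa using this
  rw [hidx]
  simp only [List.length_cons]
  omega

theorem pv_last_cons_self (x : Int) (xs : List Int) (k : Int) :
    k + (((x :: xs).length - 1 - (x :: xs).reverse.idxOf x : Nat) : Int)
      = if x ∈ xs then (k + 1) + ((xs.length - 1 - xs.reverse.idxOf x : Nat) : Int) else k := by
  by_cases hm : x ∈ xs
  · rw [if_pos hm]; exact pv_last_cons_mem x x xs k hm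
  · rw [if_neg hm]
    have hrev : List.idxOf x (xs.reverse ++ [x]) = xs.reverse.length := by
      rw [List.idxOf_append_of_notMem (by simpa using hm)]
      simp
    simp only [List.reverse_cons, hrev, List.length_cons, List.length_reverse]
    omega

-- ---- B-side loop characterisation ----
theorem pv_loopB_le (xs : List Int) (k m f l : Int) (h : ∀ x ∈ xs, x ≤ m) :
    (PySem.List.enumerate xs k).foldl pvStepB (m, f, l)
      = (m, f, if m ∈ xs then k + ((xs.length - 1 - xs.reverse.idxOf m : Nat) : Int) else l) := by
  induction xs generalizing k l with
  | nil => simp [PySem.List.enumerate]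
  | cons x xs ih =>
    have hx : x ≤ m := h x (List.mem_cons_self)
    have h' : ∀ y ∈ xs, y ≤ m := fun y hy => h y (List.mem_cons_of_mem x hy)
    rw [PySem.List.enumerate_cons, List.foldl_cons]
    by_cases he : x = m
    · have hstep : pvStepB (m, f, l) (k, x) = (m, f, k) := by
        simp [pvStepB, he]
      rw [hstep, ih (k + 1) k h']
      subst he
      have hmem : x ∈ x :: xs := List.mem_cons_self
      rw [if_pos hmem, ← pv_last_cons_self x xs k]
    · have hstep : pvStepB (m, f, l) (k, x) = (m, f, l) := by
        have : ¬ m < x := not_lt.mpr hx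
        simp [pvStepB, this, he]
      rw [hstep, ih (k + 1) l h']
      by_cases hm : m ∈ xs
      · rw [if_pos hm, if_pos (List.mem_cons_of_mem x hm),
            pv_last_cons_mem x m xs k hm]
      · have : m ∉ x :: xs := by
          simp only [List.mem_cons, not_or]
          exact ⟨fun hh => he hh.symm, hm⟩
        rw [if_neg hm, if_neg this]

theorem pv_loopB_lt (xs : List Int) (k m f l : Int) (h : m < xs.foldl max m) :
    (PySem.List.enumerate xs k).foldl pvStepB (m, f, l)
      = (xs.foldl max m,
         k + (xs.idxOf (xs.foldl max m) : Int),
         k + ((xs.length - 1 - xs.reverse.idxOf (xs.foldl max m) : Nat) : Int)) := by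
  induction xs generalizing k m f l with
  | nil => simp at h
  | cons x xs ih =>
    rw [PySem.List.enumerate_cons, List.foldl_cons]
    simp only [List.foldl_cons] at h ⊢
    by_cases hx : m < x
    · have hstep : pvStepB (m, f, l) (k, x) = (x, k, k) := by
        simp [pvStepB, hx]
      rw [hstep]
      have hmx : max m x = x := max_eq_right (le_of_lt hx)
      rw [hmx] at h ⊢
      by_cases hall : ∀ y ∈ xs, y ≤ x
      · have hM : xs.foldl max x = x := pv_foldl_max_eq_of_le xs x hall
        rw [pv_loopB_le xs (k + 1) x k k hall, hM]
        have hfirst : ((x :: xs).idxOf x : Int) = 0 := by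
          rw [List.idxOf_cons_self]; rfl
        rw [hfirst, ← pv_last_cons_self x xs k]
        simp
      · have hlt : x < xs.foldl max x := by
          push Not at hall
          obtain ⟨y, hy, hxy⟩ := hall
          exact lt_of_lt_of_le hxy (pv_all_le_foldl_max xs x y hy)
        rw [ih (k + 1) x k k hlt]
        have hMmem : xs.foldl max x ∈ xs := pv_foldl_max_mem xs x hlt
        have hne : x ≠ xs.foldl max x := ne_of_lt hlt
        rw [List.idxOf_cons_ne _ hne, pv_last_cons_mem x _ xs k hMmem]
        simp only [Prod.mk.injEq, true_and, and_true]
        push_cast; ring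
    · -- x ≤ m: maior unchanged; first/last of the state are ignored by the recursion
      have hmx : max m x = m := max_eq_left (not_lt.mp hx)
      rw [hmx] at h ⊢
      have hMmem : xs.foldl max m ∈ xs := pv_foldl_max_mem xs m h
      have hne : x ≠ xs.foldl max m := ne_of_lt (lt_of_le_of_lt (not_lt.mp hx) h)
      have hrec : ∀ f' l' : Int,
          (PySem.List.enumerate xs (k + 1)).foldl pvStepB (m, f', l')
            = (xs.foldl max m,
               (k + 1) + (xs.idxOf (xs.foldl max m) : Int),
               (k + 1) + ((xs.length - 1 - xs.reverse.idxOf (xs.foldl max m) : Nat) : Int)) :=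
        fun f' l' => ih (k + 1) m f' l' h
      by_cases he : x = m
      · have hstep : pvStepB (m, f, l) (k, x) = (m, f, k) := by
          simp [pvStepB, he]
        rw [hstep, hrec f k, List.idxOf_cons_ne _ hne, pv_last_cons_mem x _ xs k hMmem]
        simp only [Prod.mk.injEq, true_and, and_true]
        push_cast; ring
      · have hstep : pvStepB (m, f, l) (k, x) = (m, f, l) := by
          simp [pvStepB, hx, he]
        rw [hstep, hrec f l, List.idxOf_cons_ne _ hne, pv_last_cons_mem x _ xs k hMmem]
        simp only [Prod.mk.injEq, true_and, and_true]
        push_cast; ring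

-- ===== VERDICT (by name: the statement is the Claim_ definition above) =====
theorem positionDifferenceFirstLastLargest_spec : Claim_equal_positionDifferenceFirstLastLargest := by
  intro lst _ hpre
  unfold Spec_positionDifferenceFirstLastLargest
  unfold Pre_positionDifferenceFirstLastLargest at hpre
  obtain ⟨h, t, rfl⟩ : ∃ h t, lst = h :: t := by
    cases lst with
    | nil => exact absurd rfl hpre
    | cons h t => exact ⟨h, t, rfl⟩
  set M := t.foldl max h with hM
  have hfold_eq : (h :: t).foldl max h = M := by
    simp only [List.foldl_cons, max_self, hM]
  have hmaior : (h :: t).foldl (fun m n => if m < n then n else m) h = M := by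
    rw [pv_fold_max]; exact hfold_eq
  have hMmem : M ∈ h :: t := by
    by_cases hlt : h < (h :: t).foldl max h
    · rw [← hfold_eq]; exact pv_foldl_max_mem _ h hlt
    · have : (h :: t).foldl max h = h :=
        le_antisymm (not_lt.mp hlt) (pv_le_foldl_max _ h)
      rw [← hfold_eq, this]; exact List.mem_cons_self
  have hget0 : PySem.List.pyGet? (h :: t) 0 = some h := by
    simp [PySem.List.pyGet?, PySem.List.pyIdx?]
  -- port A computes first-index minus last-index through its index list
  have hfoldA := pvIdxs_fold M (h :: t) (-1) []
  rw [show (-1 : Int) + 1 = 0 by ring, List.nil_append] at hfoldA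
  have hA : positionDifferenceFirstLastLargest (h :: t) =
      (0 + ((h :: t).idxOf M : Int)) -
        (0 + (((h :: t).length - 1 - (h :: t).reverse.idxOf M : Nat) : Int)) := by
    simp only [positionDifferenceFirstLastLargest, hget0, hmaior]
    rw [hfoldA]
    rw [show PySem.List.pyGet? (pvIdxs M (h :: t) 0) 0 =
          (pvIdxs M (h :: t) 0).head? by
        simp [pysem, List.head?_eq_getElem?],
      PySem.List.pyGet?_neg_one, pvIdxs_head? M _ 0 hMmem,
      pvIdxs_getLast? M _ 0 hMmem]
  -- port B computes the same difference through its single pass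
  have hB : positionDifferenceFirstLastLargest_alt (h :: t) =
      (0 + ((h :: t).idxOf M : Int)) -
        (0 + (((h :: t).length - 1 - (h :: t).reverse.idxOf M : Nat) : Int)) := by
    simp only [positionDifferenceFirstLastLargest_alt, hget0]
    by_cases hall : ∀ x ∈ h :: t, x ≤ h
    · have hMh : M = h := by
        rw [hM]; exact pv_foldl_max_eq_of_le t h
          (fun x hx => hall x (List.mem_cons_of_mem h hx))
      rw [pv_loopB_le (h :: t) 0 h 0 0 hall]
      rw [hMh] at hMmem ⊢
      rw [if_pos hMmem, List.idxOf_cons_self]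
      simp
    · have hlt : h < (h :: t).foldl max h := by
        push Not at hall
        obtain ⟨y, hy, hxy⟩ := hall
        exact lt_of_lt_of_le hxy (pv_all_le_foldl_max (h :: t) h y hy)
      rw [pv_loopB_lt (h :: t) 0 h 0 0 hlt, hfold_eq]
  rw [hA, hB]

theorem pv_witness_ok :
    Dom_positionDifferenceFirstLastLargest pvWitness_positionDifferenceFirstLastLargest ∧
    Pre_positionDifferenceFirstLastLargest pvWitness_positionDifferenceFirstLastLargest := by
  constructor <;> decide
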